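-- pv_equiv track=rewrite | github.com/Mariogarber/PLN-Project | finetunning/utils.py | _merge_contiguous_spans
-- ===== SOURCE A (Python) =====
-- from typing import List, Set, Union, Tuple
--
-- def _merge_contiguous_spans(
--
--     toxic_positions: List[Tuple[int, int, str]],
--     text: str
-- ) -> List[Tuple[int, int, List[str]]]:
--     """
--     Merge contiguous toxic word spans into single spans.
--     Words separated only by whitespace/punctuation are considered contiguous.
--
--     Args:
--         toxic_positions: List of (start, end, word) tuples
--         text: Original text
--
--     Returns:
--         List of (start, end, [words]) tuples for merged spans
--
--     Example:
--         Input: "fucking stupid" -> [(0, 7, "fucking"), (8, 14, "stupid")]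
--         Output: [(0, 14, ["fucking", "stupid"])]
--     """
--     if not toxic_positions:
--         return []
--
--     merged_spans = []
--     current_start, current_end, current_words = toxic_positions[0][0], toxic_positions[0][1], [toxic_positions[0][2]]
--
--     for i in range(1, len(toxic_positions)):
--         start, end, word = toxic_positions[i]
--
--         # Check the text between current span and next toxic word
--         between_text = text[current_end:start]
--
--         # If only whitespace or punctuation between them, merge
--         if between_text.strip() == '' or all(c in ' \t\n,.!?;:\'"' for c in between_text):
--             # Extend current span
--             current_end = end
--             current_words.append(word)
--         else:
--             # Save current span and start new one
--             merged_spans.append((current_start, current_end, current_words))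
--             current_start, current_end, current_words = start, end, [word]
--
--     # Add the last span
--     merged_spans.append((current_start, current_end, current_words))
--
--     return merged_spans
-- ===== SOURCE B (Python) =====
-- def _merge_contiguous_spans(toxic_positions, text):
--     allowed = ' \t\n,.!?;:\'"'
--
--     def mergeable(gap):
--         return gap.strip() == '' or all(c in allowed for c in gap)
--
--     # Split the span list into maximal runs of mergeable neighbours,
--     # then build one output triple per run.
--     runs = []
--     rest = toxic_positions
--     while rest:
--         run, rest = [rest[0]], rest[1:]
--         while rest and mergeable(text[run[-1][1]:rest[0][0]]):
--             run.append(rest[0])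
--             rest = rest[1:]
--         runs.append(run)
--     return [(run[0][0], run[-1][1], [w for _, _, w in run]) for run in runs]
-- ===== Notes on version B (the rewrite author's own statement) =====
-- stated objective: alternative
-- what changed: A merges on the fly with a single fold carrying (merged, current_start, current_end, current_words); B first splits the span list into maximal mergeable runs (nested run-consuming loop over a shrinking rest list) and then maps each run to (first start, last end, words) in a separate comprehension.
import Mathlib
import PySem

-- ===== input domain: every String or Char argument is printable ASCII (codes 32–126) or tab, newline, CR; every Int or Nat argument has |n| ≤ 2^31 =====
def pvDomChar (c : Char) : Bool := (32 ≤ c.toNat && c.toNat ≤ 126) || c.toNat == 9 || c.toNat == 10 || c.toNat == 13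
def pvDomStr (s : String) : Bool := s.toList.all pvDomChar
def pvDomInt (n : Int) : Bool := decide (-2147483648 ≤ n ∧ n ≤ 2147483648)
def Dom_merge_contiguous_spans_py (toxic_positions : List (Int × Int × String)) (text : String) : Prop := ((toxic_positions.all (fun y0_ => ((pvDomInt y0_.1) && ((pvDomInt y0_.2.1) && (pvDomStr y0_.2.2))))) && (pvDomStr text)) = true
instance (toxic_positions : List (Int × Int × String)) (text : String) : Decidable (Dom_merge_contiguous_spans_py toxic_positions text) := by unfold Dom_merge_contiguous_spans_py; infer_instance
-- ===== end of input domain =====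

-- B replaces A's running-accumulator merge loop by a two-level decomposition: split the
-- span list into maximal mergeable runs, then map each run to its output triple
-- (objective: alternative decomposition, same cost).

-- ===== PORT A =====
-- the gap test shared verbatim by both Pythons:
-- between_text.strip() == '' or all(c in ' \t\n,.!?;:\'"' for c in between_text)
def pvAllowed : List Char := [' ', '\t', '\n', ',', '.', '!', '?', ';', ':', '\'', '"']

def pvGapMergeable (text : String) (ce s : Int) : Bool :=
  let bt := PySem.List.slice text.toList (some ce) (some s)
  (PySem.Chars.strip bt).isEmpty || bt.all (fun c => pvAllowed.contains c)

def merge_contiguous_spans_py (toxic_positions : List (Int × Int × String)) (text : String) : List (Int × Int × List String) :=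
  match toxic_positions with
  | [] => []
  | (s0, e0, w0) :: rest =>
    let st := rest.foldl
      (fun (acc : List (Int × Int × List String) × Int × Int × List String) x =>
        let merged := acc.1
        let cs := acc.2.1
        let ce := acc.2.2.1
        let ws := acc.2.2.2
        if pvGapMergeable text ce x.1 then
          (merged, cs, x.2.1, ws ++ [x.2.2])
        else
          (merged ++ [(cs, ce, ws)], x.1, x.2.1, [x.2.2]))
      ([], s0, e0, [w0])
    st.1 ++ [(st.2.1, st.2.2.1, st.2.2.2)]

-- ===== PORT B =====
-- inner while loop: consume the longest run of spans mergeable with the previous end pe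
def pvTakeRun (text : String) (pe : Int) : List (Int × Int × String) → (List (Int × Int × String) × List (Int × Int × String))
  | [] => ([], [])
  | x :: xs =>
    if pvGapMergeable text pe x.1 then
      let p := pvTakeRun text x.2.1 xs
      (x :: p.1, p.2)
    else ([], x :: xs)

theorem pvTakeRun_snd_length (text : String) (pe : Int) (xs : List (Int × Int × String)) :
    (pvTakeRun text pe xs).2.length ≤ xs.length := by
  induction xs generalizing pe with
  | nil => simp [pvTakeRun]
  | cons x xs ih =>
    simp only [pvTakeRun]
    split
    · exact le_trans (ih _) (Nat.le_succ _)
    · simp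

-- outer while loop: split the whole list into runs (head kept apart: run = [head] ++ tail)
def pvRuns (text : String) : List (Int × Int × String) → List ((Int × Int × String) × List (Int × Int × String))
  | [] => []
  | x :: xs =>
    let p := pvTakeRun text x.2.1 xs
    (x, p.1) :: pvRuns text p.2
termination_by xs => xs.length
decreasing_by
  exact Nat.lt_succ_of_le (pvTakeRun_snd_length text x.2.1 xs)

-- the final comprehension: (run[0][0], run[-1][1], [w for _,_,w in run])
def pvRunOut (hr : (Int × Int × String) × List (Int × Int × String)) : Int × Int × List String :=
  (hr.1.1, (hr.2.getLastD hr.1).2.1, hr.1.2.2 :: hr.2.map (fun y => y.2.2))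

def merge_contiguous_spans_py_alt (toxic_positions : List (Int × Int × String)) (text : String) : List (Int × Int × List String) :=
  (pvRuns text toxic_positions).map pvRunOut

-- ===== PRECONDITION & SPEC =====
def Spec_merge_contiguous_spans_py (toxic_positions : List (Int × Int × String)) (text : String) (out : List (Int × Int × List String)) : Prop := out = merge_contiguous_spans_py_alt toxic_positions text
instance (toxic_positions : List (Int × Int × String)) (text : String) (out : List (Int × Int × List String)) : Decidable (Spec_merge_contiguous_spans_py toxic_positions text out) := by unfold Spec_merge_contiguous_spans_py; infer_instance

-- ===== CLAIM (what is proved, stated in full; the proofs are below) =====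
def Claim_equal_merge_contiguous_spans_py : Prop := ∀ (toxic_positions : List (Int × Int × String)) (text : String), Dom_merge_contiguous_spans_py toxic_positions text → Spec_merge_contiguous_spans_py toxic_positions text (merge_contiguous_spans_py toxic_positions text)

-- ===== LEMMAS AND PROOFS =====

theorem pvRuns_nil (text : String) : pvRuns text [] = [] := by
  rw [pvRuns]

theorem pvRuns_cons (text : String) (x : Int × Int × String) (xs : List (Int × Int × String)) :
    pvRuns text (x :: xs) =
      (x, (pvTakeRun text x.2.1 xs).1) :: pvRuns text (pvTakeRun text x.2.1 xs).2 := by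
  rw [pvRuns]

-- A's loop, written as direct recursion on the remaining spans
def pvRecA (text : String) (cs ce : Int) (ws : List String) : List (Int × Int × String) → List (Int × Int × List String)
  | [] => [(cs, ce, ws)]
  | x :: r =>
    if pvGapMergeable text ce x.1 then pvRecA text cs x.2.1 (ws ++ [x.2.2]) r
    else (cs, ce, ws) :: pvRecA text x.1 x.2.1 [x.2.2] r

-- the end of the last element of a run, with default ce
def pvLastEnd (ce : Int) (r : List (Int × Int × String)) : Int :=
  r.foldl (fun _ x => x.2.1) ce

theorem pvGetLastD_end (r : List (Int × Int × String)) (h : Int × Int × String) :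
    (r.getLastD h).2.1 = pvLastEnd h.2.1 r := by
  induction r generalizing h with
  | nil => simp [pvLastEnd]
  | cons x xs ih =>
    rw [List.getLastD_cons, ih x]
    simp [pvLastEnd]

theorem pvFoldA_eq_recA (text : String) (rest : List (Int × Int × String)) :
    ∀ (merged : List (Int × Int × List String)) (cs ce : Int) (ws : List String),
      (let st := rest.foldl
        (fun (acc : List (Int × Int × List String) × Int × Int × List String) x =>
          let m := acc.1
          let cs' := acc.2.1
          let ce' := acc.2.2.1
          let ws' := acc.2.2.2
          if pvGapMergeable text ce' x.1 then
            (m, cs', x.2.1, ws' ++ [x.2.2])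
          else
            (m ++ [(cs', ce', ws')], x.1, x.2.1, [x.2.2]))
        (merged, cs, ce, ws)
       st.1 ++ [(st.2.1, st.2.2.1, st.2.2.2)]) = merged ++ pvRecA text cs ce ws rest := by
  induction rest with
  | nil => intro merged cs ce ws; simp [pvRecA]
  | cons x r ih =>
    intro merged cs ce ws
    simp only [List.foldl_cons, pvRecA]
    split
    · exact ih merged cs x.2.1 (ws ++ [x.2.2])
    · rw [ih (merged ++ [(cs, ce, ws)]) x.1 x.2.1 [x.2.2]]
      simp

theorem pvRecA_eq_runs (text : String) (xs : List (Int × Int × String)) :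
    ∀ (cs ce : Int) (ws : List String),
      pvRecA text cs ce ws xs =
        (cs, pvLastEnd ce (pvTakeRun text ce xs).1,
          ws ++ (pvTakeRun text ce xs).1.map (fun y => y.2.2))
          :: (pvRuns text (pvTakeRun text ce xs).2).map pvRunOut := by
  induction xs with
  | nil => intro cs ce ws; simp [pvRecA, pvTakeRun, pvRuns_nil, pvLastEnd]
  | cons x r ih =>
    intro cs ce ws
    simp only [pvRecA, pvTakeRun]
    split
    · rw [ih cs x.2.1 (ws ++ [x.2.2])]
      simp [pvLastEnd, List.foldl]
    · rw [ih x.1 x.2.1 [x.2.2], pvRuns_cons]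
      simp only [List.map_cons, pvRunOut]
      rw [pvGetLastD_end]
      simp [pvLastEnd]

-- ===== VERDICT (by name: the statement is the Claim_ definition above) =====
theorem merge_contiguous_spans_py_spec : Claim_equal_merge_contiguous_spans_py := by
  intro toxic_positions text _
  unfold Spec_merge_contiguous_spans_py
  match toxic_positions with
  | [] => simp [merge_contiguous_spans_py, merge_contiguous_spans_py_alt, pvRuns_nil]
  | (s0, e0, w0) :: rest =>
    show (let st := rest.foldl _ ([], s0, e0, [w0]); st.1 ++ [(st.2.1, st.2.2.1, st.2.2.2)]) = _
    rw [pvFoldA_eq_recA text rest [] s0 e0 [w0]]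
    rw [pvRecA_eq_runs text rest s0 e0 [w0]]
    simp only [merge_contiguous_spans_py_alt, pvRuns_cons, List.map_cons, pvRunOut]
    rw [pvGetLastD_end]
    simp
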